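-- pv_equiv track=rewrite | github.com/charlesgiry/advent_of_code | aoc_2023/days/day14.py | move_stone_right
-- ===== SOURCE A (Python) =====
-- def move_stone_right(array):
--     """
--     currently unused, trying to refactor the move stone method to make it more performant
--     """
--     len_y = len(array)
--     len_x = len(array[0])
--
--     signs = [[] for _ in range(len_y)]
--
--     for y in range(len_y):
--         for x in range(len_x):
--             if array[y][x] == 'O':
--                 signs[y].append(('O', x))
--             if array[y][x] == '#':
--                 signs[y].append(('#', x))
--
--     new_array = [
--         '' for i in range(len_y)
--     ]
--
--     for i in range(len_y):
--         o_count = 0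
--         previous_sharp = 0
--         for type, x in signs[i]:
--             if type == 'O':
--                 o_count += 1
--
--             if type == '#':
--                 dot_count = x - previous_sharp - o_count
--                 new_array[i] = new_array[i] + '.' * dot_count + 'O' * o_count + '#'
--                 o_count = 0
--                 previous_sharp = x + 1
--
--
--         rest = len_x - len(new_array[i])
--         dot_count = rest - o_count
--         new_array[i] = new_array[i] + '.' * dot_count + 'O' * o_count
--
--     return new_array
-- ===== SOURCE B (Python) =====
-- def move_stone_right(array):
--     w = len(array[0])
--     result = []
--     for row in array:
--         segs = row[:w].split('#')
--         result.append('#'.join('.' * (len(s) - s.count('O')) + 'O' * s.count('O')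
--                                for s in segs))
--     return result
-- ===== Notes on version B (the rewrite author's own statement) =====
-- stated objective: simpler
-- what changed: Replaces A's two-phase sign-list extraction with running o_count/previous_sharp index arithmetic by a per-row split on '#', rebuilding each wall-free segment as dots-then-stones from its 'O' count, and '#'.join-ing the segments.
import Mathlib
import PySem

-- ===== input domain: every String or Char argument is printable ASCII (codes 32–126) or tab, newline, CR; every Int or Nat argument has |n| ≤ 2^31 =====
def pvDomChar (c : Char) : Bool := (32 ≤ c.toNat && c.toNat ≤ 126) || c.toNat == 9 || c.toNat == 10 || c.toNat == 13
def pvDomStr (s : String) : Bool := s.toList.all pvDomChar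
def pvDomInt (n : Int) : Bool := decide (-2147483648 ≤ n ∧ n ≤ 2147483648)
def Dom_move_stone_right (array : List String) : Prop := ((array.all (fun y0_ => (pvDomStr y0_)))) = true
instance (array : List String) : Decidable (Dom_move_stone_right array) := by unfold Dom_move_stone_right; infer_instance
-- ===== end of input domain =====

-- B replaces A's sign-list plus running o_count/previous_sharp index arithmetic with a per-row
-- split-on-'#' / rebuild-each-segment-from-its-'O'-count / '#'.join decomposition (objective: simpler).

-- ===== PORT A =====
-- the inner `for x in range(len_x)` loop collecting signs for one row
def pvASigns (s : List Char) (len_x : Nat) : List (Char × Nat) :=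
  (List.range len_x).foldl (fun acc x =>
    let c := s.getD x ' '   -- array[y][x]; in range on every input admitted by Pre_
    let acc := if c = 'O' then acc ++ [('O', x)] else acc
    if c = '#' then acc ++ [('#', x)] else acc) []

-- one step of the `for type, x in signs[i]` loop; state = (new_array[i], o_count, previous_sharp)
-- '.' * dot_count with a possibly negative count is '' in Python = Nat subtraction's 0 here
def pvAStep (st : List Char × Nat × Nat) (tx : Char × Nat) : List Char × Nat × Nat :=
  let o_count := if tx.1 = 'O' then st.2.1 + 1 else st.2.1
  if tx.1 = '#' then
    (st.1 ++ List.replicate (tx.2 - st.2.2 - o_count) '.' ++ List.replicate o_count 'O' ++ ['#'],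
     0, tx.2 + 1)
  else (st.1, o_count, st.2.2)

-- the per-row build loop, then `rest`/final padding
def pvABuild (signs : List (Char × Nat)) (len_x : Nat) : List Char :=
  let st := signs.foldl pvAStep ([], 0, 0)
  st.1 ++ List.replicate (len_x - st.1.length - st.2.1) '.' ++ List.replicate st.2.1 'O'

def move_stone_right (array : List String) : List String :=
  let len_x := (array.headI).toList.length
  let signs := array.map (fun s => pvASigns s.toList len_x)
  signs.map (fun sg => String.mk (pvABuild sg len_x))

-- ===== PORT B =====
-- one row: split on '#', rebuild each wall-free segment as dots-then-stones, re-join with '#'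
def pvBRow (t : List Char) : List Char :=
  List.intercalate ['#'] ((t.splitOn '#').map (fun s =>
    List.replicate (s.length - s.count 'O') '.' ++ List.replicate (s.count 'O') 'O'))

def move_stone_right_alt (array : List String) : List String :=
  let w := (array.headI).toList.length
  array.map (fun row => String.mk (pvBRow (row.toList.take w)))

-- ===== PRECONDITION & SPEC =====
-- exactly where the Python A returns: a nonempty grid in which no row is shorter than the first
-- (on a shorter row A's array[y][x] raises IndexError; on [] len(array[0]) raises IndexError)
def Pre_move_stone_right (array : List String) : Prop :=
  array ≠ [] ∧ ∀ s ∈ array, (array.headI).toList.length ≤ s.toList.length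
instance (array : List String) : Decidable (Pre_move_stone_right array) := by
  unfold Pre_move_stone_right; infer_instance
def pvWitness_move_stone_right : List String := ["O.O#.O", "#.O..O"]

def Spec_move_stone_right (array : List String) (out : List String) : Prop := out = move_stone_right_alt array
instance (array : List String) (out : List String) : Decidable (Spec_move_stone_right array out) := by unfold Spec_move_stone_right; infer_instance

-- ===== CLAIM (what is proved, stated in full; the proofs are below) =====
def Claim_equal_move_stone_right : Prop := ∀ (array : List String), Dom_move_stone_right array → Pre_move_stone_right array → Spec_move_stone_right array (move_stone_right array)

-- ===== LEMMAS AND PROOFS =====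

-- recursive characterisation of A's sign list (absolute index carried along)
def sigList : List Char → Nat → List (Char × Nat)
  | [], _ => []
  | c :: cs, i =>
    (if c = 'O' then [('O', i)] else if c = '#' then [('#', i)] else []) ++ sigList cs (i + 1)

theorem intercalate_cons₂ {α : Type} (s a l0 : List α) (ls : List (List α)) :
    List.intercalate s (a :: l0 :: ls) = a ++ s ++ List.intercalate s (l0 :: ls) := by
  simp [List.intercalate, List.intersperse, List.append_assoc]

-- common recursive form of one rolled row: o = stones pending, seen = chars since the last wall
def gRow : List Char → Nat → Nat → List Char
  | [], o, seen => List.replicate (seen - o) '.' ++ List.replicate o 'O'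
  | c :: cs, o, seen =>
    if c = '#' then
      List.replicate (seen - o) '.' ++ List.replicate o 'O' ++ '#' :: gRow cs 0 0
    else gRow cs (if c = 'O' then o + 1 else o) (seen + 1)

theorem sigList_append (u v : List Char) (i : Nat) :
    sigList (u ++ v) i = sigList u i ++ sigList v (i + u.length) := by
  induction u generalizing i with
  | nil => simp [sigList]
  | cons c cs ih => simp [sigList, ih, Nat.add_assoc, Nat.add_comm 1]

theorem pvASigns_eq (s : List Char) (n : Nat) (h : n ≤ s.length) :
    pvASigns s n = sigList (s.take n) 0 := by
  induction n with
  | zero => simp [pvASigns, sigList]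
  | succ n ih =>
    have hn : n < s.length := h
    have h' : n ≤ s.length := le_of_lt hn
    unfold pvASigns
    rw [List.range_succ, List.foldl_append]
    rw [show (List.range n).foldl _ [] = pvASigns s n from rfl, ih h']
    rw [List.take_add_one, sigList_append]
    have hg : s[n]? = some s[n] := List.getElem?_eq_getElem hn
    simp only [List.length_take, Nat.min_eq_left h', hg, Option.toList_some, List.foldl_cons,
      List.foldl_nil, List.getD_eq_getElem s ' ' hn, Nat.zero_add]
    by_cases hO : s[n] = 'O'
    · simp [sigList, hO]
    · by_cases hS : s[n] = '#' <;> simp [sigList, hO, hS]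

theorem gRow_fold (t : List Char) (i : Nat) (acc : List Char) (o prev : Nat)
    (h1 : prev ≤ i) (h2 : o ≤ i - prev) (h3 : acc.length = prev) :
    (let st := (sigList t i).foldl pvAStep (acc, o, prev)
     st.1 ++ List.replicate ((i + t.length) - st.1.length - st.2.1) '.' ++
       List.replicate st.2.1 'O')
    = acc ++ gRow t o (i - prev) := by
  induction t generalizing i acc o prev with
  | nil => subst h3; simp [sigList, gRow]
  | cons c cs ih =>
    rw [sigList, List.foldl_append]
    by_cases hS : c = '#'
    · subst hS
      simp only [reduceIte, if_neg (by decide : ¬('#' = 'O')), List.foldl_cons, List.foldl_nil]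
      have hstep : pvAStep (acc, o, prev) ('#', i) =
          (acc ++ List.replicate (i - prev - o) '.' ++ List.replicate o 'O' ++ ['#'], 0, i + 1) := by
        simp [pvAStep]
      rw [hstep]
      have hlen : (acc ++ List.replicate (i - prev - o) '.' ++ List.replicate o 'O' ++ ['#']).length
          = i + 1 := by
        simp [List.length_append, List.length_replicate]; omega
      have htot : i + (cs.length + 1) = (i + 1) + cs.length := by omega
      rw [show ('#' :: cs : List Char).length = cs.length + 1 from rfl, htot]
      rw [ih (i + 1) _ 0 (i + 1) (le_refl _) (by omega) hlen]
      rw [gRow, if_pos rfl]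
      simp [List.append_assoc]
    · by_cases hO : c = 'O'
      · subst hO
        simp only [reduceIte, if_neg hS, List.foldl_cons, List.foldl_nil]
        have hstep : pvAStep (acc, o, prev) ('O', i) = (acc, o + 1, prev) := by
          simp [pvAStep]
        rw [hstep,
          show ('O' :: cs : List Char).length = cs.length + 1 from rfl,
          show i + (cs.length + 1) = (i + 1) + cs.length from by omega,
          ih (i + 1) acc (o + 1) prev (by omega) (by omega) h3,
          gRow, if_neg hS, show (i + 1) - prev = (i - prev) + 1 from by omega]
        simp
      · simp only [if_neg hO, if_neg hS, List.foldl_nil]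
        rw [show (c :: cs : List Char).length = cs.length + 1 from rfl,
          show i + (cs.length + 1) = (i + 1) + cs.length from by omega,
          ih (i + 1) acc o prev (by omega) (by omega) h3,
          gRow, if_neg hS, if_neg hO, show (i + 1) - prev = (i - prev) + 1 from by omega]

theorem gRow_eq_pvBRow (t pre : List Char) (h : '#' ∉ pre) :
    gRow t (pre.count 'O') pre.length = pvBRow (pre ++ t) := by
  induction t generalizing pre with
  | nil =>
    have h' : ∀ x ∈ pre, ¬((x == '#') = true) := by
      intro x hx
      simp only [beq_iff_eq]
      rintro rfl
      exact h hx
    have hs : (pre.splitOn '#') = [pre] := by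
      unfold List.splitOn
      exact List.splitOnP_eq_single _ _ h'
    simp [pvBRow, gRow, hs, List.intercalate]
  | cons c cs ih =>
    by_cases hS : c = '#'
    · subst hS
      have h' : ∀ x ∈ pre, ¬((x == '#') = true) := by
        intro x hx
        simp only [beq_iff_eq]
        rintro rfl
        exact h hx
      have hs : ((pre ++ '#' :: cs).splitOn '#') = pre :: cs.splitOn '#' := by
        unfold List.splitOn
        exact List.splitOnP_first _ _ h' '#' (by simp) cs
      obtain ⟨l0, ls, hls⟩ := List.exists_cons_of_ne_nil
        (show (cs.splitOn '#').map (fun s => List.replicate (s.length - s.count 'O') '.' ++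
          List.replicate (s.count 'O') 'O') ≠ [] by
          simpa using fun hq => List.splitOnP_ne_nil _ cs (by simpa [List.splitOn] using hq))
      have hnil : gRow cs 0 0 = pvBRow cs := by simpa using ih [] (by simp)
      rw [gRow, if_pos rfl, hnil]
      unfold pvBRow
      rw [hs, List.map_cons, hls, intercalate_cons₂]
      simp [List.append_assoc]
    · have hpc : '#' ∉ pre ++ [c] := by
        intro hx
        rcases List.mem_append.mp hx with h1 | h2
        · exact h h1
        · simp at h2; exact hS h2.symm
      have := ih (pre ++ [c]) hpc
      rw [gRow, if_neg hS]
      have hcnt : (pre ++ [c]).count 'O' = if c = 'O' then pre.count 'O' + 1 else pre.count 'O' := by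
        by_cases hO : c = 'O' <;> simp [List.count_append, hO]
      have hlen2 : (pre ++ [c]).length = pre.length + 1 := by simp
      rw [hcnt, hlen2] at this
      by_cases hO : c = 'O'
      · simpa [hO, List.append_assoc] using this
      · simpa [hO, List.append_assoc] using this

theorem row_eq (t : List Char) : pvABuild (sigList t 0) t.length = pvBRow t := by
  have h := gRow_fold t 0 [] 0 0 (by omega) (by omega) rfl
  have h2 := gRow_eq_pvBRow t [] (by simp)
  simpa [pvABuild, gRow_eq_pvBRow] using h.trans (by simpa using h2)

-- ===== VERDICT (by name: the statement is the Claim_ definition above) =====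
theorem move_stone_right_spec : Claim_equal_move_stone_right := by
  intro array _ hpre
  obtain ⟨hne, hlen⟩ := hpre
  unfold Spec_move_stone_right move_stone_right move_stone_right_alt
  simp only [List.map_map]
  refine List.map_congr_left (fun s hs => ?_)
  have hw : (array.headI).toList.length ≤ s.toList.length := hlen s hs
  simp only [Function.comp]
  rw [pvASigns_eq s.toList _ hw]
  set t := s.toList.take (array.headI).toList.length with ht
  have htake : t.length = (array.headI).toList.length := by
    rw [ht, List.length_take]
    exact Nat.min_eq_left hw
  rw [← htake, row_eq]
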